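-- pv_equiv track=rewrite | github.com/BeautterLife/Algorithms | 프로그래머스/코딩테스트연습/스택,큐,힙/더맵게.py | solution
-- ===== SOURCE A (Python) =====
-- import heapq
--
-- def solution(scoville, K):
--     answer = 0
--     heapq.heapify(scoville)
--
--     while len(scoville)>1 and scoville[0]<K:
--         food_1 = heapq.heappop(scoville)
--         food_2 = heapq.heappop(scoville)
--
--         heapq.heappush(scoville, food_1+food_2*2)
--         answer+=1
--
--     return answer if scoville[0]>=K else -1
-- ===== SOURCE B (Python) =====
-- def solution(scoville, K):
--     scoville.sort()
--     answer = 0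
--     while len(scoville) > 1 and scoville[0] < K:
--         food_1 = scoville.pop(0)
--         food_2 = scoville.pop(0)
--         mixed = food_1 + food_2 * 2
--         i = 0
--         while i < len(scoville) and scoville[i] <= mixed:
--             i += 1
--         scoville.insert(i, mixed)
--         answer += 1
--     return answer if scoville[0] >= K else -1
-- ===== Notes on version B (the rewrite author's own statement) =====
-- stated objective: alternative
-- what changed: Replaces the binary min-heap (heapify/heappop/heappush) with a once-sorted list maintained by linear sorted insertion of each mixed value, so the two smallest are always the first two elements.
import Mathlib
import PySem

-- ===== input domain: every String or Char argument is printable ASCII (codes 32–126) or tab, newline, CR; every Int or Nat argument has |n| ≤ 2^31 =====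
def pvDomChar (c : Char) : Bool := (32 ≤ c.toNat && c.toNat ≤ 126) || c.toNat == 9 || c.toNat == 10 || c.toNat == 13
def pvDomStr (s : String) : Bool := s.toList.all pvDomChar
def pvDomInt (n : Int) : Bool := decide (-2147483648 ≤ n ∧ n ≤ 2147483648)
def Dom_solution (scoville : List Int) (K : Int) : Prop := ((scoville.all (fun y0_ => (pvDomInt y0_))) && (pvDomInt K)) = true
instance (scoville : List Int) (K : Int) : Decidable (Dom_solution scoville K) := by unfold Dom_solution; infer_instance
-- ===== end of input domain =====

-- B maintains a sorted list instead of A's heap; both Pythons mutate `scoville` in place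
-- (A leaves a heap ordering, B a sorted ordering) — the equivalence proved here is about the RETURN value only.

-- ===== PORT A =====
-- heapq is a library A calls: its heap is modelled as the multiset it holds — heappop extracts the
-- minimum (what scoville[0] / heappop observe on a heap) and heappush adds the element; this is
-- value-faithful, since the heap's internal array layout is unobservable in A's return value.
def solutionGo (heap : List Int) (K : Int) (ans : Int) : Int :=
  match hm : PySem.List.min? heap (fun x => x) with
  | none => -1  -- heap empty: Python's scoville[0] raises IndexError (excluded by Pre_)
  | some food1 =>
    if h : 1 < heap.length ∧ food1 < K then
      match hm2 : PySem.List.min? (heap.erase food1) (fun x => x) with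
      | none => -1  -- unreachable: heap had ≥ 2 elements
      | some food2 =>
        solutionGo (((heap.erase food1).erase food2) ++ [food1 + food2 * 2]) K (ans + 1)
    else if K ≤ food1 then ans else -1
termination_by heap.length
decreasing_by
  have h1 : food1 ∈ heap := PySem.List.min?_mem hm
  have h2 : food2 ∈ heap.erase food1 := PySem.List.min?_mem hm2
  simp [List.length_erase_of_mem h1, List.length_erase_of_mem h2]
  have := List.length_erase_of_mem h1
  have := List.length_erase_of_mem h2
  omega

def solution (scoville : List Int) (K : Int) : Int :=
  solutionGo scoville K 0

-- ===== PORT B =====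
-- linear insertion into the sorted list: advance while scoville[i] <= mixed, insert at i
def insortB (l : List Int) (x : Int) : List Int :=
  match l with
  | [] => [x]
  | y :: ys => if y ≤ x then y :: insortB ys x else x :: y :: ys

-- used by solutionAltGo's termination proof
theorem insortB_length (l : List Int) (x : Int) : (insortB l x).length = l.length + 1 := by
  induction l with
  | nil => simp [insortB]
  | cons y ys ih => simp only [insortB]; split <;> simp [ih]

def solutionAltGo (l : List Int) (K : Int) (ans : Int) : Int :=
  match l with
  | [] => -1  -- scoville[0] raises IndexError (excluded by Pre_)
  | [a] => if a ≥ K then ans else -1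
  | a :: b :: rest =>
    if a < K then solutionAltGo (insortB rest (a + b * 2)) K (ans + 1)
    else if a ≥ K then ans else -1
termination_by l.length
decreasing_by
  simp [insortB_length]

def solution_alt (scoville : List Int) (K : Int) : Int :=
  solutionAltGo (PySem.List.sorted scoville (fun x => x) false) K 0

-- ===== PRECONDITION & SPEC =====
-- Pre_ excludes exactly the empty list, on which A raises IndexError at scoville[0].
def Pre_solution (scoville : List Int) (K : Int) : Prop := scoville ≠ []
instance (scoville : List Int) (K : Int) : Decidable (Pre_solution scoville K) := by unfold Pre_solution; infer_instance
def pvWitness_solution : List Int × Int := ([1, 2, 3, 9, 10, 12], 7)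

def Spec_solution (scoville : List Int) (K : Int) (out : Int) : Prop := out = solution_alt scoville K
instance (scoville : List Int) (K : Int) (out : Int) : Decidable (Spec_solution scoville K out) := by unfold Spec_solution; infer_instance

-- ===== CLAIM (what is proved, stated in full; the proofs are below) =====
def Claim_equal_solution : Prop := ∀ (scoville : List Int) (K : Int), Dom_solution scoville K → Pre_solution scoville K → Spec_solution scoville K (solution scoville K)

-- ===== LEMMAS AND PROOFS =====

theorem insortB_perm (l : List Int) (x : Int) : (insortB l x).Perm (x :: l) := by
  induction l with
  | nil => simp [insortB]
  | cons y ys ih =>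
    simp only [insortB]
    split
    · exact (ih.cons y).trans (List.Perm.swap x y ys)
    · exact List.Perm.refl _

theorem insortB_pairwise (l : List Int) (x : Int) (h : l.Pairwise (· ≤ ·)) :
    (insortB l x).Pairwise (· ≤ ·) := by
  induction l with
  | nil => simp [insortB]
  | cons y ys ih =>
    rcases List.pairwise_cons.mp h with ⟨hy, hys⟩
    simp only [insortB]
    split
    · rename_i hyx
      refine List.pairwise_cons.mpr ⟨?_, ih hys⟩
      intro z hz
      rcases List.mem_cons.mp ((insortB_perm ys x).mem_iff.mp hz) with rfl | hz
      · omega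
      · exact hy z hz
    · rename_i hyx
      refine List.pairwise_cons.mpr ⟨?_, h⟩
      intro z hz
      rcases List.mem_cons.mp hz with rfl | hz
      · omega
      · have := hy z hz; omega

-- the core invariant: A's heap and B's sorted list hold the same multiset
theorem go_eq (n : Nat) : ∀ (heap s : List Int) (K ans : Int),
    heap.length ≤ n → s.Perm heap → s.Pairwise (· ≤ ·) → heap ≠ [] →
    solutionGo heap K ans = solutionAltGo s K ans := by
  induction n with
  | zero =>
    intro heap s K ans hlen _ _ hne
    cases heap with
    | nil => exact absurd rfl hne
    | cons a t => simp at hlen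
  | succ n ih =>
    intro heap s K ans hlen hperm hpw hne
    -- s is nonempty
    cases s with
    | nil => exact absurd (hperm.symm.eq_nil ▸ rfl : heap = []) hne
    | cons a s' =>
    rcases List.pairwise_cons.mp hpw with ⟨ha, hpw'⟩
    -- the minimum of heap is a
    rcases hmin : PySem.List.min? heap (fun x => x) with _ | m
    · exact absurd ((PySem.List.min?_eq_none_iff _ _).mp hmin) hne
    have hmmem : m ∈ heap := PySem.List.min?_mem hmin
    have hmlow : ∀ y ∈ heap, m ≤ y := fun y hy => PySem.List.min?_isMin hmin y hy
    have hma : m = a := by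
      have h1 : m ≤ a := hmlow a (hperm.subset (List.mem_cons_self ..))
      have h2 : a ≤ m := by
        rcases List.mem_cons.mp (hperm.symm.subset hmmem) with h | h
        · omega
        · exact ha m h
      omega
    subst hma
    have hlen_eq : s'.length + 1 = heap.length := by
      have := hperm.length_eq; simpa using this
    rw [solutionGo]
    split
    · rename_i heq; rw [hmin] at heq; exact absurd heq (by simp)
    rename_i m' heq
    rw [hmin] at heq
    injection heq with heq; subst heq
    by_cases hcond : 1 < heap.length ∧ m < K
    · -- loop body runs on both sides
      -- s' is nonempty
      cases s' with
      | nil => simp at hlen_eq; omega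
      | cons b s'' =>
      rcases List.pairwise_cons.mp hpw' with ⟨hb, hpw''⟩
      have hrest : (b :: s'').Perm (heap.erase m) := by
        have := hperm.erase m
        simpa using this
      have hrestne : heap.erase m ≠ [] := by
        intro h0
        have := hrest.length_eq
        rw [h0] at this; simp at this
      rcases hmin2 : PySem.List.min? (heap.erase m) (fun x => x) with _ | m2
      · exact absurd ((PySem.List.min?_eq_none_iff _ _).mp hmin2) hrestne
      have hm2mem : m2 ∈ heap.erase m := PySem.List.min?_mem hmin2
      have hm2b : m2 = b := by
        have h1 : m2 ≤ b := PySem.List.min?_isMin hmin2 b (hrest.subset (List.mem_cons_self ..))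
        have h2 : b ≤ m2 := by
          rcases List.mem_cons.mp (hrest.symm.subset hm2mem) with h | h
          · omega
          · exact hb m2 h
        omega
      subst hm2b
      rw [dif_pos hcond]
      split
      · rename_i heq2; exact absurd heq2 (by simp)
      rename_i b' heq2
      injection heq2 with heq2; subst heq2
      -- B side takes the loop branch too
      have haK : m < K := hcond.2
      rw [solutionAltGo, if_pos haK]
      -- apply the IH
      have hpera : (insortB s'' (m + m2 * 2)).Perm ((heap.erase m).erase m2 ++ [m + m2 * 2]) := by
        refine (insortB_perm s'' (m + m2 * 2)).trans ?_
        refine List.Perm.trans ?_ (List.perm_append_singleton _ _).symm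
        refine List.Perm.cons _ ?_
        have := hrest.erase m2
        simpa using this
      have hlennew : ((heap.erase m).erase m2 ++ [m + m2 * 2]).length ≤ n := by
        have e1 := List.length_erase_of_mem hmmem
        have e2 := List.length_erase_of_mem hm2mem
        simp only [List.length_append, List.length_cons, List.length_nil, e1, e2]
        omega
      exact ih _ _ K (ans + 1) hlennew hpera (insortB_pairwise _ _ hpw'') (by simp)
    · -- loop exits on both sides
      rw [dif_neg hcond]
      cases s' with
      | nil =>
        rw [solutionAltGo]
      | cons b s'' =>
        have hgt : 1 < heap.length := by
          simp only [List.length_cons] at hlen_eq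
          omega
        have hKm : K ≤ m := by
          by_contra h
          exact hcond ⟨hgt, by omega⟩
        rw [solutionAltGo]
        have h1 : ¬ (m < K) := by omega
        have h2 : m ≥ K := by omega
        rw [if_neg h1, if_pos h2]

theorem solution_spec : Claim_equal_solution := by
  intro scoville K _ hpre
  unfold Spec_solution solution solution_alt
  refine go_eq scoville.length scoville _ K 0 le_rfl ?_ ?_ hpre
  · exact PySem.List.sorted_perm ..
  · have := PySem.List.sorted_pairwise (xs := scoville) (key := fun x => x)
    simpa using this
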